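-- pv_equiv track=rewrite | github.com/kartikey20/CP-Algorithms | String Processing/Tasks/Expression parsing/B. Text Document Analysis.py | calc_max_length
-- ===== SOURCE A (Python) =====
-- def calc_max_length(string):
--     n = len(string)
--     i = 0
--     max_len = 0
--     length = 0
--     while i < n:
--         if string[i] in ['_', '(', ')']:
--             length = 0
--         else:
--             length += 1
--         max_len = max(max_len, length)
--         i += 1
--     return max_len
-- ===== SOURCE B (Python) =====
-- def calc_max_length(string):
--     segments = []
--     cur = ''
--     for ch in string:
--         if ch in '_()':
--             segments.append(cur)
--             cur = ''
--         else:
--             cur += ch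
--     segments.append(cur)
--     return max(len(seg) for seg in segments)
-- ===== Notes on version B (the rewrite author's own statement) =====
-- stated objective: alternative
-- what changed: B splits the string on the separator characters into a list of token segments and then returns the maximum segment length, instead of A's single pass maintaining a running counter and an inline running maximum.
import Mathlib
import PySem

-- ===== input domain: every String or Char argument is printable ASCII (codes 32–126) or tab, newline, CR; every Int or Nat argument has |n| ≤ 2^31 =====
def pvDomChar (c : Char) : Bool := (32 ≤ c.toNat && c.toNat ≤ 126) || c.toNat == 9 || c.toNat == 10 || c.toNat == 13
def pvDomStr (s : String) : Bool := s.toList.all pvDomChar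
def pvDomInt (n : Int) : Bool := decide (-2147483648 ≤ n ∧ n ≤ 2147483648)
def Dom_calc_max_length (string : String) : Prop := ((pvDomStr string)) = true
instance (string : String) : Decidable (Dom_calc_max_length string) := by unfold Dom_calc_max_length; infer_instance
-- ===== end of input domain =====

-- B tokenizes the string on '_', '(' , ')' into segments and returns the maximum segment
-- length, instead of A's running counter with an inline running maximum. Objective: alternative.

-- ===== PORT A =====
-- the while loop over indices, transcribed as structural recursion over the remaining characters;
-- state = (max_len, length)
def pvLoopA : List Char → Int → Int → Int
  | [], maxLen, _ => maxLen
  | c :: cs, maxLen, len =>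
      let len' := if c = '_' ∨ c = '(' ∨ c = ')' then 0 else len + 1
      pvLoopA cs (max maxLen len') len'

def calc_max_length (string : String) : Int :=
  pvLoopA string.toList 0 0

-- ===== PORT B =====
-- the for loop accumulating (segments, cur); `ch in '_()'` for a single char is exactly
-- membership of the char in the separator characters
def pvLoopB : List Char → List (List Char) → List Char → List (List Char)
  | [], segs, cur => segs ++ [cur]
  | c :: cs, segs, cur =>
      if c ∈ ['_', '(', ')'] then pvLoopB cs (segs ++ [cur]) []
      else pvLoopB cs segs (cur ++ [c])

def calc_max_length_alt (string : String) : Int :=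
  let segments := pvLoopB string.toList [] []
  match PySem.List.max? (segments.map (fun t => (t.length : Int))) (fun y => y) with
  | some v => v
  | none => 0

-- ===== PRECONDITION & SPEC =====
def Spec_calc_max_length (string : String) (out : Int) : Prop := out = calc_max_length_alt string
instance (string : String) (out : Int) : Decidable (Spec_calc_max_length string out) := by unfold Spec_calc_max_length; infer_instance

-- ===== CLAIM (what is proved, stated in full; the proofs are below) =====
def Claim_equal_calc_max_length : Prop := ∀ (string : String), Dom_calc_max_length string → Spec_calc_max_length string (calc_max_length string)

-- ===== LEMMAS AND PROOFS =====

-- pull a `max` through a running-max fold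
theorem pv_foldl_max_pull (ls : List Int) (a b : Int) :
    ls.foldl max (max a b) = max a (ls.foldl max b) := by
  induction ls generalizing b with
  | nil => simp
  | cons x t ih =>
      simp only [List.foldl_cons]
      rw [show max (max a b) x = max a (max b x) by omega, ih]

theorem pv_le_foldl_max (ls : List Int) (a : Int) : a ≤ ls.foldl max a := by
  induction ls generalizing a with
  | nil => simp
  | cons x t ih => exact le_trans (le_max_left a x) (ih _)

theorem pvLoopB_append (cs : List Char) (segs : List (List Char)) (cur : List Char) :
    pvLoopB cs segs cur = segs ++ pvLoopB cs [] cur := by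
  induction cs generalizing segs cur with
  | nil => simp [pvLoopB]
  | cons c t ih =>
      by_cases h : c ∈ ['_', '(', ')']
      · simp only [pvLoopB, if_pos h, List.nil_append]
        rw [ih (segs ++ [cur]) [], ih [cur] []]
        simp
      · simp only [pvLoopB, if_neg h, List.nil_append]
        exact ih segs (cur ++ [c])

theorem pvLoopB_ne_nil (cs : List Char) (cur : List Char) : pvLoopB cs [] cur ≠ [] := by
  induction cs generalizing cur with
  | nil => simp [pvLoopB]
  | cons c t ih =>
      by_cases h : c ∈ ['_', '(', ')']
      · simp only [pvLoopB, if_pos h, List.nil_append]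
        rw [pvLoopB_append t [cur] []]
        simp
      · simp only [pvLoopB, if_neg h, List.nil_append]
        exact ih _

-- the current segment's length is bounded by the final running max
theorem pv_cur_le (cs : List Char) (cur : List Char) (acc : Int) :
    (cur.length : Int) ≤ ((pvLoopB cs [] cur).map (fun t => (t.length : Int))).foldl max acc := by
  induction cs generalizing cur acc with
  | nil =>
      simp only [pvLoopB, List.nil_append, List.map_cons, List.map_nil,
        List.foldl_cons, List.foldl_nil]
      exact le_max_right acc _
  | cons c t ih =>
      by_cases h : c ∈ ['_', '(', ')']
      · simp only [pvLoopB, if_pos h, List.nil_append]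
        rw [pvLoopB_append t [cur] []]
        simp only [List.singleton_append, List.map_cons, List.foldl_cons]
        exact le_trans (le_max_right acc _) (pv_le_foldl_max _ _)
      · simp only [pvLoopB, if_neg h, List.nil_append]
        have := ih (cur ++ [c]) acc
        simp only [List.length_append, List.length_cons, List.length_nil] at this
        push_cast at this
        omega

-- main invariant: A's loop equals the running max over B's segments
theorem pv_main (cs : List Char) (m l : Int) (cur : List Char)
    (hm : 0 ≤ m) (hc : (cur.length : Int) = l) (hl : l ≤ m) :
    pvLoopA cs m l = ((pvLoopB cs [] cur).map (fun t => (t.length : Int))).foldl max m := by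
  induction cs generalizing m l cur with
  | nil =>
      simp only [pvLoopA, pvLoopB, List.nil_append, List.map_cons, List.map_nil,
        List.foldl_cons, List.foldl_nil]
      omega
  | cons c t ih =>
      by_cases h : c ∈ ['_', '(', ')']
      · have hsep : c = '_' ∨ c = '(' ∨ c = ')' := by simpa using h
        simp only [pvLoopA, pvLoopB, if_pos hsep, if_pos h, List.nil_append]
        rw [pvLoopB_append t [cur] []]
        simp only [List.singleton_append, List.map_cons, List.foldl_cons]
        rw [show max m (0 : Int) = m by omega,
            show max m ((cur.length : Int)) = m by omega]
        exact ih m 0 [] hm rfl hm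
      · have hsep : ¬ (c = '_' ∨ c = '(' ∨ c = ')') := by simpa using h
        simp only [pvLoopA, pvLoopB, if_neg hsep, if_neg h, List.nil_append]
        have hc' : (((cur ++ [c]).length : Int)) = l + 1 := by
          simp only [List.length_append, List.length_cons, List.length_nil]
          push_cast; omega
        rw [ih (max m (l + 1)) (l + 1) (cur ++ [c]) (by omega) hc' (by omega)]
        rw [show max m (l + 1) = max (l + 1) m by omega, pv_foldl_max_pull]
        have := pv_cur_le t (cur ++ [c]) m
        rw [hc'] at this
        omega

-- ===== VERDICT (by name: the statement is the Claim_ definition above) =====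
theorem calc_max_length_spec : Claim_equal_calc_max_length := by
  intro s _
  unfold Spec_calc_max_length calc_max_length calc_max_length_alt
  obtain ⟨x, rest, hx⟩ : ∃ x rest, pvLoopB s.toList [] [] = x :: rest := by
    cases hE : pvLoopB s.toList [] [] with
    | nil => exact absurd hE (pvLoopB_ne_nil _ _)
    | cons a b => exact ⟨a, b, rfl⟩
  rw [pv_main s.toList 0 0 [] le_rfl rfl le_rfl, hx]
  simp only [List.map_cons, PySem.List.max?_id_cons, List.foldl_cons]
  rw [show max (0 : Int) ((x.length : Int)) = ((x.length : Int)) by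
        have := Int.natCast_nonneg x.length; omega]
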